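-- pv_equiv track=rewrite | github.com/dgamboa/challenge-practice | minDiffArrays.py | minDiffOfArrays
-- ===== SOURCE A (Python) =====
-- def minDiffOfArrays(a, b):
--     # aggregate the absolute difference between a[n] - b[n] for each n item
--     agg = []
--
--     # track the max impact of changing each n item in a for another item in a
--     # [impact of change, index to change, index to import from]
--     tracker = [0, 0, 0]
--
--     # loop through all items in b one by one
--     for i in range(len(b)):
--       diff = abs(a[i] - b[i])
--       agg.append(diff)
--
--       # loop through all items in a one by one
--       for j in range(len(a)):
--         cur = diff - abs(a[j] - b[i])
--         if cur > tracker[0]: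
--           tracker = [cur, i, j]
--
--     # change the item in a that minimizes the difference
--     agg[tracker[1]] = agg[tracker[1]] - tracker[0]
--
--     return sum(agg)
-- ===== SOURCE B (Python) =====
-- def minDiffOfArrays(a, b):
--     # Sort a once; for each b[i], binary-search the nearest value in a,
--     # tracking the best single-swap reduction. O((n+m) log n) instead of O(n*m).
--     s = sorted(a)
--     total = 0
--     best = 0
--     for i in range(len(b)):
--         bi = b[i]
--         diff = abs(a[i] - bi)
--         total += diff
--         # bisect_left by hand (no imports in the original module)
--         lo, hi = 0, len(s)
--         while lo < hi:
--             mid = (lo + hi) // 2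
--             if s[mid] < bi:
--                 lo = mid + 1
--             else:
--                 hi = mid
--         nd = None
--         if lo < len(s):
--             nd = abs(s[lo] - bi)
--         if lo > 0:
--             d2 = abs(bi - s[lo - 1])
--             if nd is None or d2 < nd:
--                 nd = d2
--         red = diff - nd
--         if red > best:
--             best = red
--     return total - best
-- ===== Notes on version B (the rewrite author's own statement) =====
-- stated objective: faster
-- what changed: Replaces the O(n*m) inner scan of a for every b[i] by sorting a once and binary-searching the nearest element of a to each b[i], tracking total and best reduction in one pass instead of A's tracker-triple plus post-hoc list patch.
import Mathlib
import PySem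

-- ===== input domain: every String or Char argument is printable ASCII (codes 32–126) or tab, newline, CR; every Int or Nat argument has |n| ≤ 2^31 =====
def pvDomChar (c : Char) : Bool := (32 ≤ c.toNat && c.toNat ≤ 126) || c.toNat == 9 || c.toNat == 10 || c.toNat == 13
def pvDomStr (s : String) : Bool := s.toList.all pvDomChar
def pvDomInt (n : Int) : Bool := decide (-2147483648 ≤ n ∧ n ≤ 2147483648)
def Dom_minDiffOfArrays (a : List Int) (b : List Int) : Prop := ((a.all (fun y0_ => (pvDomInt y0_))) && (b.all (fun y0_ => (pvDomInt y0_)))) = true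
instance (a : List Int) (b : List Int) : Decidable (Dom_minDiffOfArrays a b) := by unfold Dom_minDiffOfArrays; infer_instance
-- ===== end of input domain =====

-- B sorts a once and binary-searches the nearest a-value to each b[i] (one pass, no inner scan): asymptotically faster than A's nested loops.
-- A and B only return: neither mutates its arguments.

-- ===== PORT A =====
-- literal transliteration of Source A: agg list, tracker triple [impact, i, j], nested index loops, final patch of agg[tracker[1]].
def minDiffOfArrays (a : List Int) (b : List Int) : Int :=
  let st := (PySem.List.pyRange 0 (b.length : Int) 1).foldl (fun (st : List Int × (Int × Int × Int)) i =>
    let diff := |PySem.List.pyGetD a i 0 - PySem.List.pyGetD b i 0|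
    let agg := st.1 ++ [diff]
    let tr := (PySem.List.pyRange 0 (a.length : Int) 1).foldl (fun (tr : Int × Int × Int) j =>
      let cur := diff - |PySem.List.pyGetD a j 0 - PySem.List.pyGetD b i 0|
      if cur > tr.1 then (cur, i, j) else tr) st.2
    (agg, tr)) ([], (0, 0, 0))
  -- agg[tracker[1]] = agg[tracker[1]] - tracker[0]; the index is in range whenever Python returns (else Python raises IndexError, excluded by Pre_)
  let agg := st.1.set st.2.2.1.toNat (PySem.List.pyGetD st.1 st.2.2.1 0 - st.2.1)
  agg.sum

-- ===== PORT B =====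
-- hand-written bisect_left loop from Source B (while lo < hi …), ported with fuel hi - lo (a pure totality guard: it never runs out)
def bsearchAlt (s : List Int) (x : Int) : Nat → Nat → Nat → Nat
  | 0, lo, _ => lo
  | fuel + 1, lo, hi =>
    if lo < hi then
      let mid := (lo + hi) / 2
      if s.getD mid 0 < x then bsearchAlt s x fuel (mid + 1) hi else bsearchAlt s x fuel lo mid
    else lo

def minDiffOfArrays_alt (a : List Int) (b : List Int) : Int :=
  let s := PySem.List.sorted a (fun y => y)
  let st := (PySem.List.pyRange 0 (b.length : Int) 1).foldl (fun (st : Int × Int) i =>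
    let bi := PySem.List.pyGetD b i 0
    let diff := |PySem.List.pyGetD a i 0 - bi|
    let total := st.1 + diff
    let lo := bsearchAlt s bi s.length 0 s.length
    let nd : Option Int := if lo < s.length then some (|s.getD lo 0 - bi|) else none
    let nd : Option Int :=
      if 0 < lo then
        let d2 := |bi - s.getD (lo - 1) 0|
        match nd with
        | none => some d2
        | some v => if d2 < v then some d2 else some v
      else nd
    -- nd = none only when a = [] (then Python's `diff - nd` raises TypeError; such inputs are outside Pre_)
    let red := diff - nd.getD 0
    (total, if red > st.2 then red else st.2)) (0, 0)
  st.1 - st.2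

-- ===== PRECONDITION & SPEC =====
-- Pre_ excludes exactly the inputs where A raises IndexError: empty b (the final agg[tracker[1]] patch) and b longer than a (a[i] lookup).
def Pre_minDiffOfArrays (a : List Int) (b : List Int) : Prop := b ≠ [] ∧ b.length ≤ a.length
instance (a : List Int) (b : List Int) : Decidable (Pre_minDiffOfArrays a b) := by unfold Pre_minDiffOfArrays; infer_instance
def pvWitness_minDiffOfArrays : List Int × List Int := ([5, 1, 3], [2, 4])

def Spec_minDiffOfArrays (a : List Int) (b : List Int) (out : Int) : Prop := out = minDiffOfArrays_alt a b
instance (a : List Int) (b : List Int) (out : Int) : Decidable (Spec_minDiffOfArrays a b out) := by unfold Spec_minDiffOfArrays; infer_instance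

-- ===== CLAIM (what is proved, stated in full; the proofs are below) =====
def Claim_equal_minDiffOfArrays : Prop := ∀ (a : List Int) (b : List Int), Dom_minDiffOfArrays a b → Pre_minDiffOfArrays a b → Spec_minDiffOfArrays a b (minDiffOfArrays a b)
-- ===== LEMMAS AND PROOFS =====

-- absolute difference of the i-th pair, and the min distance from x to the values of a list
def pvDif (a b : List Int) (i : Int) : Int :=
  |PySem.List.pyGetD a i 0 - PySem.List.pyGetD b i 0|

def pvAmin (x : Int) (l : List Int) : Int :=
  ((l.map (fun c => |c - x|)).min?).getD 0

-- B's per-element candidate distance (the nd computed from the binary search), as a closed helper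
def pvCand (a : List Int) (x : Int) : Int :=
  let s := PySem.List.sorted a (fun y => y)
  let lo := bsearchAlt s x s.length 0 s.length
  let nd : Option Int := if lo < s.length then some (|s.getD lo 0 - x|) else none
  let nd : Option Int :=
    if 0 < lo then
      let d2 := |x - s.getD (lo - 1) 0|
      match nd with
      | none => some d2
      | some v => if d2 < v then some d2 else some v
    else nd
  nd.getD 0

lemma pv_foldl_max_min_aux (d x : Int) :
    ∀ (xs : List Int) (t v : Int),
    xs.foldl (fun m c => max m (d - |c - x|)) (max t (d - v)) =
      max t (d - xs.foldl (fun v c => min v (|c - x|)) v) := by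
  intro xs
  induction xs with
  | nil => intro t v; simp
  | cons c cs ih =>
    intro t v
    simp only [List.foldl_cons]
    rw [show max (max t (d - v)) (d - |c - x|) = max t (d - min v |c - x|) by omega]
    exact ih t (min v |c - x|)

-- folding `max (d - |c - x|)` over a nonempty list is `max t (d - min distance)`
lemma pv_foldl_max_min (d x t : Int) (l : List Int) (hl : l ≠ []) :
    l.foldl (fun m c => max m (d - |c - x|)) t = max t (d - pvAmin x l) := by
  obtain ⟨c, cs, rfl⟩ := List.exists_cons_of_ne_nil hl
  simp only [pvAmin, List.map_cons, List.min?_cons', Option.getD_some, List.foldl_cons]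
  rw [List.foldl_map]
  exact pv_foldl_max_min_aux d x cs t (|c - x|)

-- min? is invariant under permutation
lemma pv_min?_perm (l₁ l₂ : List Int) (h : l₁.Perm l₂) : l₁.min? = l₂.min? := by
  cases h2 : l₂.min? with
  | none =>
    rw [List.min?_eq_none_iff] at h2 ⊢
    subst h2; exact h.eq_nil
  | some a =>
    rw [List.min?_eq_some_iff] at h2 ⊢
    exact ⟨h.mem_iff.mpr h2.1, fun b hb => h2.2 b (h.mem_iff.mp hb)⟩

-- replacing L[k] by L[k] - t lowers the sum by t
lemma pv_sum_set_sub (L : List Int) (k : Nat) (h : k < L.length) (t : Int) :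
    (L.set k (L.getD k 0 - t)).sum = L.sum - t := by
  rw [List.sum_set, if_pos h]
  conv_rhs => rw [show L.sum = (L.take k).sum + (L.drop k).sum by
    rw [← List.sum_append, List.take_append_drop]]
  rw [List.drop_eq_getElem_cons h, List.sum_cons, List.getD_eq_getElem _ _ h]
  ring

-- sortedness gives index monotonicity of getD
lemma pv_sorted_mono (s : List Int) (hs : s.Pairwise (· ≤ ·)) (i j : Nat)
    (hij : i ≤ j) (hj : j < s.length) : s.getD i 0 ≤ s.getD j 0 := by
  rcases Nat.lt_or_ge i j with h | h
  · rw [List.getD_eq_getElem _ _ (by omega), List.getD_eq_getElem _ _ hj]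
    exact List.pairwise_iff_getElem.mp hs i j (by omega) hj h
  · have : i = j := by omega
    subst this; rfl

-- the hand-rolled binary-search loop computes bisect_left
lemma pv_bsearch_spec (s : List Int) (x : Int) (hs : s.Pairwise (· ≤ ·)) :
    ∀ (fuel lo hi : Nat), lo ≤ hi → hi ≤ s.length → hi - lo ≤ fuel →
    (∀ j, j < lo → s.getD j 0 < x) → (∀ j, hi ≤ j → j < s.length → x ≤ s.getD j 0) →
    lo ≤ bsearchAlt s x fuel lo hi ∧ bsearchAlt s x fuel lo hi ≤ hi ∧
    (∀ j, j < bsearchAlt s x fuel lo hi → s.getD j 0 < x) ∧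
    (∀ j, bsearchAlt s x fuel lo hi ≤ j → j < s.length → x ≤ s.getD j 0) := by
  intro fuel
  induction fuel with
  | zero =>
    intro lo hi h1 h2 h3 hlo hhi
    have : lo = hi := by omega
    subst this
    exact ⟨le_refl _, le_refl _, hlo, hhi⟩
  | succ fuel ih =>
    intro lo hi h1 h2 h3 hlo hhi
    by_cases hlt : lo < hi
    · simp only [bsearchAlt, if_pos hlt]
      set mid := (lo + hi) / 2 with hmid
      have hmb : lo ≤ mid ∧ mid < hi := by omega
      by_cases hc : s.getD mid 0 < x
      · rw [if_pos hc]
        obtain ⟨p1, p2, p3, p4⟩ := ih (mid + 1) hi (by omega) h2 (by omega)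
          (fun j hj => lt_of_le_of_lt (pv_sorted_mono s hs j mid (by omega) (by omega)) hc)
          hhi
        exact ⟨by omega, p2, p3, p4⟩
      · rw [if_neg hc]
        have hc' : x ≤ s.getD mid 0 := by omega
        obtain ⟨p1, p2, p3, p4⟩ := ih lo mid (by omega) (by omega) (by omega) hlo
          (fun j hj1 hj2 => le_trans hc' (pv_sorted_mono s hs mid j hj1 hj2))
        exact ⟨p1, by omega, p3, p4⟩
    · simp only [bsearchAlt, if_neg hlt]
      have : lo = hi := by omega
      subst this
      exact ⟨le_refl _, le_refl _, hlo, hhi⟩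

lemma pv_getD_mem_map (s : List Int) (x : Int) (j : Nat) (hj : j < s.length) :
    |s.getD j 0 - x| ∈ s.map (fun c => |c - x|) := by
  rw [List.getD_eq_getElem _ _ hj]
  exact List.mem_map_of_mem (s.getElem_mem hj)

-- B's candidate is exactly the minimum distance from x to the values of a
lemma pv_cand_eq (a : List Int) (x : Int) (ha : a ≠ []) : pvCand a x = pvAmin x a := by
  have hperm : (PySem.List.sorted a (fun y => y)).Perm a := PySem.List.sorted_perm a (fun y => y) false
  have hs : (PySem.List.sorted a (fun y => y)).Pairwise (· ≤ ·) := PySem.List.sorted_pairwise a (fun y => y)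
  set s := PySem.List.sorted a (fun y => y) with hsdef
  have hlen : s.length = a.length := hperm.length_eq
  have hne : 0 < s.length := by
    rw [hlen]; exact List.length_pos_of_ne_nil ha
  set k := bsearchAlt s x s.length 0 s.length with hk
  obtain ⟨_, hk2, hk3, hk4⟩ := pv_bsearch_spec s x hs s.length 0 s.length (by omega) (le_refl _) (by omega)
    (fun j hj => absurd hj (by omega)) (fun j hj1 hj2 => absurd (lt_of_le_of_lt hj1 hj2) (by omega))
  -- case equations for the candidate
  have hc1 : k = 0 → pvCand a x = |s.getD k 0 - x| := by
    intro h0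
    simp only [pvCand, ← hsdef, ← hk]
    rw [if_neg (by omega), if_pos (by omega), Option.getD_some, h0]
  have hc2 : 0 < k → k < s.length →
      pvCand a x = (if |x - s.getD (k - 1) 0| < |s.getD k 0 - x| then |x - s.getD (k - 1) 0| else |s.getD k 0 - x|) := by
    intro h0 h1
    simp only [pvCand, ← hsdef, ← hk]
    rw [if_pos h1, if_pos h0]
    show (if |x - s.getD (k - 1) 0| < |s.getD k 0 - x| then some (|x - s.getD (k - 1) 0|)
          else some (|s.getD k 0 - x|)).getD 0 = _
    split_ifs with h3 <;> rfl
  have hc3 : 0 < k → ¬ k < s.length → pvCand a x = |x - s.getD (k - 1) 0| := by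
    intro h0 h1
    simp only [pvCand, ← hsdef, ← hk]
    rw [if_neg h1, if_pos h0]
    rfl
  have hmem : pvCand a x ∈ s.map (fun c => |c - x|) := by
    rcases Nat.eq_zero_or_pos k with h0 | h0
    · rw [hc1 h0]
      exact pv_getD_mem_map s x k (by omega)
    · by_cases h1 : k < s.length
      · rw [hc2 h0 h1]
        split_ifs with h3
        · rw [abs_sub_comm]; exact pv_getD_mem_map s x (k - 1) (by omega)
        · exact pv_getD_mem_map s x k h1
      · rw [hc3 h0 h1, abs_sub_comm]
        exact pv_getD_mem_map s x (k - 1) (by omega)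
  have hlb : ∀ y ∈ s.map (fun c => |c - x|), pvCand a x ≤ y := by
    intro y hy
    obtain ⟨c, hc, rfl⟩ := List.mem_map.mp hy
    obtain ⟨j, hj, rfl⟩ := List.mem_iff_getElem.mp hc
    rw [← List.getD_eq_getElem s 0 hj]
    rcases Nat.lt_or_ge j k with hjk | hjk
    · -- s[j] < x; candidate ≤ x - s[k-1] ≤ x - s[j]
      have h0 : 0 < k := by omega
      have hjx : s.getD j 0 < x := hk3 j hjk
      have hmono : s.getD j 0 ≤ s.getD (k - 1) 0 := pv_sorted_mono s hs j (k - 1) (by omega) (by omega)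
      have hk1x : s.getD (k - 1) 0 < x := hk3 (k - 1) (by omega)
      have habsj : |s.getD j 0 - x| = x - s.getD j 0 := by
        rw [abs_sub_comm]; exact abs_of_nonneg (by omega)
      have habsL : |x - s.getD (k - 1) 0| = x - s.getD (k - 1) 0 := abs_of_nonneg (by omega)
      by_cases h1 : k < s.length
      · rw [hc2 h0 h1]; split_ifs with h3 <;> omega
      · rw [hc3 h0 h1]; omega
    · -- x ≤ s[j]; candidate ≤ s[k] - x ≤ s[j] - x
      have hjx : x ≤ s.getD j 0 := hk4 j hjk hj
      have h1 : k < s.length := by omega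
      have hmono : s.getD k 0 ≤ s.getD j 0 := pv_sorted_mono s hs k j hjk hj
      have hkx : x ≤ s.getD k 0 := hk4 k (le_refl _) h1
      have habsj : |s.getD j 0 - x| = s.getD j 0 - x := abs_of_nonneg (by omega)
      have habsR : |s.getD k 0 - x| = s.getD k 0 - x := abs_of_nonneg (by omega)
      rcases Nat.eq_zero_or_pos k with h0 | h0
      · rw [hc1 h0]; omega
      · rw [hc2 h0 h1]; split_ifs with h3 <;> omega
  have hmin : (s.map (fun c => |c - x|)).min? = some (pvCand a x) :=
    List.min?_eq_some_iff.mpr ⟨hmem, hlb⟩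
  have hp := pv_min?_perm (a.map (fun c => |c - x|)) (s.map (fun c => |c - x|)) ((hperm.map _).symm)
  simp only [pvAmin, hp, hmin, Option.getD_some]

-- the two loop bodies as named step functions (definitionally equal to the port lambdas)
def pvAstep (a b : List Int) (st : List Int × (Int × Int × Int)) (i : Int) :
    List Int × (Int × Int × Int) :=
  (st.1 ++ [pvDif a b i],
   (PySem.List.pyRange 0 (a.length : Int) 1).foldl (fun (tr : Int × Int × Int) j =>
     if pvDif a b i - |PySem.List.pyGetD a j 0 - PySem.List.pyGetD b i 0| > tr.1 then
       (pvDif a b i - |PySem.List.pyGetD a j 0 - PySem.List.pyGetD b i 0|, i, j) else tr) st.2)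

def pvBstep (a b : List Int) (st : Int × Int) (i : Int) : Int × Int :=
  (st.1 + pvDif a b i,
   if pvDif a b i - pvCand a (PySem.List.pyGetD b i 0) > st.2 then
     pvDif a b i - pvCand a (PySem.List.pyGetD b i 0) else st.2)

-- inner loop of A: first tracker component folds max
lemma pv_innerA_fst (a : List Int) (d x i : Int) :
    ∀ (L : List Int) (tr : Int × Int × Int),
    (L.foldl (fun tr j =>
      if d - |PySem.List.pyGetD a j 0 - x| > tr.1 then (d - |PySem.List.pyGetD a j 0 - x|, i, j) else tr) tr).1
    = L.foldl (fun m j => max m (d - |PySem.List.pyGetD a j 0 - x|)) tr.1 := by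
  intro L
  induction L with
  | nil => intro tr; rfl
  | cons c cs ih =>
    intro tr
    simp only [List.foldl_cons]
    rw [ih]
    congr 1
    split_ifs with h <;> simp <;> omega

-- inner loop of A: the stored i-index is the old one or i
lemma pv_innerA_idx (a : List Int) (d x i : Int) :
    ∀ (L : List Int) (tr : Int × Int × Int),
    (L.foldl (fun tr j =>
      if d - |PySem.List.pyGetD a j 0 - x| > tr.1 then (d - |PySem.List.pyGetD a j 0 - x|, i, j) else tr) tr).2.1 = tr.2.1 ∨
    (L.foldl (fun tr j =>
      if d - |PySem.List.pyGetD a j 0 - x| > tr.1 then (d - |PySem.List.pyGetD a j 0 - x|, i, j) else tr) tr).2.1 = i := by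
  intro L
  induction L with
  | nil => intro tr; left; rfl
  | cons c cs ih =>
    intro tr
    simp only [List.foldl_cons]
    split_ifs with h
    · rcases ih ((d - |PySem.List.pyGetD a c 0 - x|, i, c)) with h2 | h2
      · right; rw [h2]
      · right; exact h2
    · exact ih tr

lemma pvAstep_fst (a b : List Int) (st : List Int × (Int × Int × Int)) (i : Int) :
    (pvAstep a b st i).1 = st.1 ++ [pvDif a b i] := rfl

lemma pvAstep_tr1 (a b : List Int) (st : List Int × (Int × Int × Int)) (i : Int) :
    (pvAstep a b st i).2.1 =
      a.foldl (fun m c => max m (pvDif a b i - |c - PySem.List.pyGetD b i 0|)) st.2.1 := by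
  simp only [pvAstep]
  rw [pv_innerA_fst]
  exact PySem.List.foldl_pyRange_zero_pyGetD' a 0
    (fun m c => max m (pvDif a b i - |c - PySem.List.pyGetD b i 0|)) st.2.1

lemma pvAstep_idx (a b : List Int) (st : List Int × (Int × Int × Int)) (i : Int) :
    (pvAstep a b st i).2.2.1 = st.2.2.1 ∨ (pvAstep a b st i).2.2.1 = i := by
  simp only [pvAstep]
  exact pv_innerA_idx a (pvDif a b i) (PySem.List.pyGetD b i 0) i
    (PySem.List.pyRange 0 (a.length : Int) 1) st.2

lemma pvBstep_eq (a b : List Int) (st : Int × Int) (i : Int) :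
    pvBstep a b st i =
      (st.1 + pvDif a b i, max st.2 (pvDif a b i - pvCand a (PySem.List.pyGetD b i 0))) := by
  unfold pvBstep
  congr 1
  rw [max_def]
  split_ifs <;> omega

-- characterization of A's outer fold
lemma pv_A_outer (a b : List Int) (ha : a ≠ []) (n : Nat) :
    ((PySem.List.pyRange 0 (n : Int) 1).foldl (pvAstep a b) ([], (0, 0, 0))).1 =
      (PySem.List.pyRange 0 (n : Int) 1).map (pvDif a b) ∧
    ((PySem.List.pyRange 0 (n : Int) 1).foldl (pvAstep a b) ([], (0, 0, 0))).2.1 =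
      (PySem.List.pyRange 0 (n : Int) 1).foldl
        (fun m i => max m (pvDif a b i - pvAmin (PySem.List.pyGetD b i 0) a)) 0 ∧
    0 ≤ ((PySem.List.pyRange 0 (n : Int) 1).foldl (pvAstep a b) ([], (0, 0, 0))).2.2.1 ∧
    (((PySem.List.pyRange 0 (n : Int) 1).foldl (pvAstep a b) ([], (0, 0, 0))).2.2.1 < (n : Int) ∨
     ((PySem.List.pyRange 0 (n : Int) 1).foldl (pvAstep a b) ([], (0, 0, 0))).2.2.1 = 0) := by
  induction n with
  | zero =>
    rw [show ((0 : Nat) : Int) = 0 by norm_num, PySem.List.pyRange_one_eq_nil (by omega)]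
    exact ⟨rfl, rfl, by norm_num, Or.inr rfl⟩
  | succ n ih =>
    obtain ⟨ih1, ih2, ih3, ih4⟩ := ih
    rw [show ((n + 1 : Nat) : Int) = (n : Int) + 1 by push_cast; ring]
    rw [PySem.List.pyRange_one_succ_right (by omega)]
    simp only [List.foldl_append, List.foldl_cons, List.foldl_nil, List.map_append, List.map_cons,
      List.map_nil]
    refine ⟨?_, ?_, ?_, ?_⟩
    · rw [pvAstep_fst, ih1]
    · rw [pvAstep_tr1, ih2, pv_foldl_max_min _ _ _ a ha]
    · rcases pvAstep_idx a b
        ((PySem.List.pyRange 0 (n : Int) 1).foldl (pvAstep a b) ([], (0, 0, 0))) (n : Int) with h | h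
      · rw [h]; exact ih3
      · rw [h]; omega
    · rcases pvAstep_idx a b
        ((PySem.List.pyRange 0 (n : Int) 1).foldl (pvAstep a b) ([], (0, 0, 0))) (n : Int) with h | h
      · rw [h]; omega
      · rw [h]; left; omega

-- characterization of B's outer fold
lemma pv_B_outer (a b : List Int) (n : Nat) :
    (PySem.List.pyRange 0 (n : Int) 1).foldl (pvBstep a b) (0, 0) =
    (((PySem.List.pyRange 0 (n : Int) 1).map (pvDif a b)).sum,
     (PySem.List.pyRange 0 (n : Int) 1).foldl
       (fun m i => max m (pvDif a b i - pvCand a (PySem.List.pyGetD b i 0))) 0) := by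
  induction n with
  | zero =>
    rw [show ((0 : Nat) : Int) = 0 by norm_num, PySem.List.pyRange_one_eq_nil (by omega)]
    rfl
  | succ n ih =>
    rw [show ((n + 1 : Nat) : Int) = (n : Int) + 1 by push_cast; ring]
    rw [PySem.List.pyRange_one_succ_right (by omega)]
    simp only [List.foldl_append, List.foldl_cons, List.foldl_nil, List.map_append, List.map_cons,
      List.map_nil, List.sum_append, List.sum_cons, List.sum_nil]
    rw [ih, pvBstep_eq]
    simp

-- the equivalence on Pre_
lemma pv_main (a b : List Int) (hb : b ≠ []) (hlen : b.length ≤ a.length) :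
    minDiffOfArrays a b = minDiffOfArrays_alt a b := by
  have hn : 0 < b.length := List.length_pos_of_ne_nil hb
  have ha : a ≠ [] := by
    intro h
    rw [h] at hlen
    simp only [List.length_nil, Nat.le_zero] at hlen
    omega
  obtain ⟨h1, h2, h3, h4⟩ := pv_A_outer a b ha b.length
  have hB : minDiffOfArrays_alt a b =
      (((PySem.List.pyRange 0 (b.length : Int) 1).map (pvDif a b)).sum) -
      (PySem.List.pyRange 0 (b.length : Int) 1).foldl
        (fun m i => max m (pvDif a b i - pvCand a (PySem.List.pyGetD b i 0))) 0 := by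
    have h0 : minDiffOfArrays_alt a b =
        ((PySem.List.pyRange 0 (b.length : Int) 1).foldl (pvBstep a b) (0, 0)).1 -
        ((PySem.List.pyRange 0 (b.length : Int) 1).foldl (pvBstep a b) (0, 0)).2 := rfl
    rw [h0, pv_B_outer a b b.length]
  have hA : minDiffOfArrays a b =
      (((PySem.List.pyRange 0 (b.length : Int) 1).map (pvDif a b)).sum) -
      (PySem.List.pyRange 0 (b.length : Int) 1).foldl
        (fun m i => max m (pvDif a b i - pvAmin (PySem.List.pyGetD b i 0) a)) 0 := by
    have h0 : minDiffOfArrays a b =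
        (((PySem.List.pyRange 0 (b.length : Int) 1).foldl (pvAstep a b) ([], (0, 0, 0))).1.set
          ((PySem.List.pyRange 0 (b.length : Int) 1).foldl (pvAstep a b) ([], (0, 0, 0))).2.2.1.toNat
          (PySem.List.pyGetD
            ((PySem.List.pyRange 0 (b.length : Int) 1).foldl (pvAstep a b) ([], (0, 0, 0))).1
            ((PySem.List.pyRange 0 (b.length : Int) 1).foldl (pvAstep a b) ([], (0, 0, 0))).2.2.1 0 -
          ((PySem.List.pyRange 0 (b.length : Int) 1).foldl (pvAstep a b) ([], (0, 0, 0))).2.1)).sum := rfl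
    rw [h0, h1, h2]
    generalize hg : ((PySem.List.pyRange 0 (b.length : Int) 1).foldl (pvAstep a b)
      ([], (0, 0, 0))).2.2.1 = idx at h3 h4 ⊢
    have hidxlt : idx.toNat < ((PySem.List.pyRange 0 (b.length : Int) 1).map (pvDif a b)).length := by
      rw [List.length_map, PySem.List.length_pyRange_one]
      omega
    have hcast : (idx.toNat : Int) = idx := Int.toNat_of_nonneg h3
    have hget : PySem.List.pyGetD ((PySem.List.pyRange 0 (b.length : Int) 1).map (pvDif a b)) idx 0 =
        ((PySem.List.pyRange 0 (b.length : Int) 1).map (pvDif a b)).getD idx.toNat 0 := by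
      conv_lhs => rw [← hcast]
      rw [PySem.List.pyGetD_natCast]
    rw [hget, pv_sum_set_sub _ _ hidxlt]
  rw [hA, hB]
  have hfun : (fun (m : Int) (i : Int) => max m (pvDif a b i - pvAmin (PySem.List.pyGetD b i 0) a)) =
      (fun (m : Int) (i : Int) => max m (pvDif a b i - pvCand a (PySem.List.pyGetD b i 0))) := by
    funext m i
    rw [pv_cand_eq a (PySem.List.pyGetD b i 0) ha]
  rw [hfun]

-- ===== VERDICT (by name: the statement is the Claim_ definition above) =====
theorem minDiffOfArrays_spec : Claim_equal_minDiffOfArrays := by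
  intro a b _ hpre
  unfold Spec_minDiffOfArrays
  exact pv_main a b hpre.1 hpre.2
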